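-- pv_equiv track=rewrite | github.com/Choeseonjeong/Test | BaekJoon/0906/23.py | solution
-- ===== SOURCE A (Python) =====
-- def solution(s):
--     a = []
--     for i in s:
--         if len(a) == 0:
--             a.append(i)
--         elif a[-1] == i:
--             a.pop()
--         else:
--             a.append(i)
--     if len(a) == 0:
--         return 1
--     else:
--         return 0
-- ===== SOURCE B (Python) =====
-- def solution(s):
--     t = list(s)
--     while True:
--         for i in range(len(t) - 1):
--             if t[i] == t[i + 1]:
--                 del t[i:i + 2]
--                 break
--         else:
--             return 1 if not t else 0
-- ===== Notes on version B (the rewrite author's own statement) =====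
-- stated objective: alternative
-- what changed: Replaces the single stack pass with repeated scan-and-splice: find the first adjacent equal pair, delete it, and restart until no pair remains; relies on confluence of adjacent-pair cancellation.
import Mathlib
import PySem

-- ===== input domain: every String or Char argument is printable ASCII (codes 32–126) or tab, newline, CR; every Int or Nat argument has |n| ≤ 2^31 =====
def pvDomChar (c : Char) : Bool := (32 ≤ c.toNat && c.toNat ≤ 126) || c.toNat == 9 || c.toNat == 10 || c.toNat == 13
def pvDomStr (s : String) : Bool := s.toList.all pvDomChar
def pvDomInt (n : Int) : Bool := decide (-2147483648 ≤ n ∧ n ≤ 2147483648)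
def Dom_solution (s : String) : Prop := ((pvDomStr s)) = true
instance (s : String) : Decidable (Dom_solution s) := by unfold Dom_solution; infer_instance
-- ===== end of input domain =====

-- B replaces A's single stack pass by repeated scan-and-splice of the first adjacent
-- equal pair (alternative decomposition; not faster); equivalence rests on confluence
-- of adjacent-pair cancellation.

-- ===== PORT A =====
-- loop body of A (append / pop / append)
def stepA (a : List Char) (i : Char) : List Char :=
  if a.length = 0 then a ++ [i]
  else if a.getLast? = some i then a.dropLast
  else a ++ [i]

def solution (s : String) : Int :=
  let a := s.toList.foldl stepA []
  if a.length = 0 then 1 else 0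

-- ===== PORT B =====
-- index of the first adjacent equal pair (the successful i of Source B's for-loop), none = the for/else 'else'
def findPair : List Char → Option Nat
  | c :: d :: rest => if c = d then some 0 else (findPair (d :: rest)).map (· + 1)
  | _ => none

theorem findPair_le {l : List Char} {i : Nat} (h : findPair l = some i) : i + 2 ≤ l.length := by
  induction l generalizing i with
  | nil => simp [findPair] at h
  | cons c t ih =>
    match t, h with
    | d :: rest, h =>
      by_cases hcd : c = d
      · simp [findPair, hcd] at h
        simp only [List.length_cons]; omega
      · simp [findPair, hcd] at h
        obtain ⟨j, hj, rfl⟩ := h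
        have := ih hj
        simp only [List.length_cons] at this ⊢; omega

-- the outer while-True loop of Source B: delete the found pair (del t[i:i+2]) and rescan; stop when none remains
def reduceLoop (l : List Char) : List Char :=
  match h : findPair l with
  | none => l
  | some i => reduceLoop (l.take i ++ l.drop (i + 2))
termination_by l.length
decreasing_by
  have := findPair_le h
  simp only [List.length_append, List.length_take, List.length_drop]
  omega

def solution_alt (s : String) : Int :=
  if (reduceLoop s.toList).isEmpty then 1 else 0

-- ===== PRECONDITION & SPEC =====
def Spec_solution (s : String) (out : Int) : Prop := out = solution_alt s
instance (s : String) (out : Int) : Decidable (Spec_solution s out) := by unfold Spec_solution; infer_instance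

-- ===== CLAIM (what is proved, stated in full; the proofs are below) =====
def Claim_equal_solution : Prop := ∀ (s : String), Dom_solution s → Spec_solution s (solution s)

-- ===== LEMMAS AND PROOFS =====

theorem reduceLoop_none {l : List Char} (h : findPair l = none) : reduceLoop l = l := by
  conv_lhs => rw [reduceLoop.eq_def]
  split <;> simp_all

theorem reduceLoop_some {l : List Char} {i : Nat} (h : findPair l = some i) :
    reduceLoop l = reduceLoop (l.take i ++ l.drop (i + 2)) := by
  conv_lhs => rw [reduceLoop.eq_def]
  split <;> simp_all

-- elements meeting at a list junction differ, in a no-adjacent-dup list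
theorem junction_ne {b : List Char} {y x : Char} {t : List Char}
    (h : List.IsChain (· ≠ ·) ((b ++ [y]) ++ x :: t)) : y ≠ x :=
  (List.isChain_append.mp h).2.2 y (by simp) x (by simp)

-- A's stack never holds two equal adjacent elements
theorem chain_stepA {a : List Char} (i : Char) (h : List.IsChain (· ≠ ·) a) :
    List.IsChain (· ≠ ·) (stepA a i) := by
  unfold stepA
  split_ifs with h0 hl
  · have : a = [] := List.length_eq_zero_iff.mp h0
    subst this
    simp
  · exact h.prefix (List.dropLast_prefix a)
  · rcases List.eq_nil_or_concat a with rfl | ⟨b, x, rfl⟩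
    · simp at h0
    · refine List.isChain_append.mpr ⟨h, by simp, ?_⟩
      intro p hp q hq
      simp at hp hq
      subst hp hq
      simp at hl
      exact hl

-- cancellation: a doubled letter is invisible to A's stack pass (needs the no-adjacent-dup invariant)
theorem cancel_pair {a : List Char} (c : Char) (ys : List Char) (h : List.IsChain (· ≠ ·) a) :
    (c :: c :: ys).foldl stepA a = ys.foldl stepA a := by
  have key : stepA (stepA a c) c = a := by
    rcases List.eq_nil_or_concat a with rfl | ⟨b, x, rfl⟩
    · simp [stepA]
    · simp only [List.concat_eq_append] at h ⊢
      by_cases hxc : x = c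
      · rw [hxc]
        have h1 : stepA (b ++ [c]) c = b := by simp [stepA]
        rw [h1]
        rcases List.eq_nil_or_concat b with rfl | ⟨b', y, rfl⟩
        · simp [stepA]
        · have hyc : y ≠ c := junction_ne (t := []) (by simpa [hxc] using h)
          simp [stepA, hyc]
      · simp [stepA, hxc]
  simp only [List.foldl_cons, key]

-- a string with no adjacent equal pair passes through A's stack unchanged
theorem fixed_of_chain {a : List Char} (l : List Char)
    (h : List.IsChain (· ≠ ·) (a ++ l)) : l.foldl stepA a = a ++ l := by
  induction l generalizing a with
  | nil => simp
  | cons x t ih =>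
    have hstep : stepA a x = a ++ [x] := by
      rcases List.eq_nil_or_concat a with rfl | ⟨b, y, rfl⟩
      · simp [stepA]
      · have hyx : y ≠ x := junction_ne (by simpa using h)
        simp [stepA, hyx]
    have := ih (a := a ++ [x]) (by simpa using h)
    simp only [List.foldl_cons, hstep, this, List.append_assoc, List.singleton_append]

theorem findPair_none_chain {l : List Char} (h : findPair l = none) :
    List.IsChain (· ≠ ·) l := by
  induction l with
  | nil => simp
  | cons c t ih =>
    match t with
    | [] => simp
    | d :: rest =>
      by_cases hcd : c = d
      · simp [findPair, hcd] at h
      · simp [findPair, hcd] at h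
        exact List.isChain_cons_cons.mpr ⟨hcd, ih h⟩

-- splicing out the found pair does not change A's stack result
theorem splice_eq {a : List Char} {l : List Char} {i : Nat}
    (hc : List.IsChain (· ≠ ·) a) (h : findPair l = some i) :
    l.foldl stepA a = (l.take i ++ l.drop (i + 2)).foldl stepA a := by
  induction l generalizing a i with
  | nil => simp [findPair] at h
  | cons c t ih =>
    match t with
    | [] => simp [findPair] at h
    | d :: rest =>
      by_cases hcd : c = d
      · simp [findPair, hcd] at h
        subst hcd
        obtain rfl : i = 0 := by omega
        simpa using cancel_pair c rest hc
      · simp [findPair, hcd] at h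
        obtain ⟨j, hj, rfl⟩ := h
        have := ih (a := stepA a c) (chain_stepA c hc) hj
        simpa [List.take_succ_cons] using this

theorem reduceLoop_foldl (l : List Char) :
    l.foldl stepA [] = reduceLoop l := by
  induction l using reduceLoop.induct with
  | case1 l h =>
    rw [reduceLoop_none h]
    exact fixed_of_chain l (by simpa using findPair_none_chain h)
  | case2 l i h ih =>
    rw [reduceLoop_some h, ← ih]
    exact splice_eq (by simp) h

-- ===== VERDICT (by name: the statement is the Claim_ definition above) =====
theorem solution_spec : Claim_equal_solution := by
  intro s _
  unfold Spec_solution solution solution_alt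
  rw [reduceLoop_foldl]
  rcases reduceLoop s.toList with _ | ⟨c, t⟩ <;> simp
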